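-- pv_equiv track=rewrite | github.com/harqian/mtfc-equitable_busses | model.py | _resolve_equity_population_field
-- ===== SOURCE A (Python) =====
-- from typing import Optional, Sequence
--
-- _EQUITY_POPULATION_FIELDS = (
--     "tot_pop",
--     "totpop",
--     "population",
--     "total_population",
-- )
--
-- def _resolve_equity_population_field(columns: Sequence[object]) -> str:
--     normalized = {str(column).strip().lower(): str(column) for column in columns}
--     for candidate in _EQUITY_POPULATION_FIELDS:
--         if candidate in normalized:
--             return normalized[candidate]
--     raise ValueError(
--         "MTC EPC GeoJSON is missing a supported tract population field; "
--         f"tried {_EQUITY_POPULATION_FIELDS}"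
--     )
-- ===== SOURCE B (Python) =====
-- _EQUITY_POPULATION_FIELDS = (
--     "tot_pop",
--     "totpop",
--     "population",
--     "total_population",
-- )
--
-- def _resolve_equity_population_field(columns):
--     rank = {field: i for i, field in enumerate(_EQUITY_POPULATION_FIELDS)}
--     best_rank = None
--     best_original = None
--     for column in columns:
--         original = str(column)
--         r = rank.get(original.strip().lower())
--         if r is None:
--             continue
--         if best_rank is None or r <= best_rank:
--             best_rank = r
--             best_original = original
--     if best_original is None:
--         raise ValueError(
--             "MTC EPC GeoJSON is missing a supported tract population field; "
--             f"tried {_EQUITY_POPULATION_FIELDS}"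
--         )
--     return best_original
-- ===== Notes on version B (the rewrite author's own statement) =====
-- stated objective: alternative
-- what changed: Replaces the build-normalized-dict-then-probe-candidates-in-priority-order scheme with a single pass over the columns that keeps a running (best_rank, best_original) pair via a precomputed rank map, using <= so a later column with an equally ranked normalized name overrides an earlier one, matching A's dict-overwrite tie-breaking.
import Mathlib
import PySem

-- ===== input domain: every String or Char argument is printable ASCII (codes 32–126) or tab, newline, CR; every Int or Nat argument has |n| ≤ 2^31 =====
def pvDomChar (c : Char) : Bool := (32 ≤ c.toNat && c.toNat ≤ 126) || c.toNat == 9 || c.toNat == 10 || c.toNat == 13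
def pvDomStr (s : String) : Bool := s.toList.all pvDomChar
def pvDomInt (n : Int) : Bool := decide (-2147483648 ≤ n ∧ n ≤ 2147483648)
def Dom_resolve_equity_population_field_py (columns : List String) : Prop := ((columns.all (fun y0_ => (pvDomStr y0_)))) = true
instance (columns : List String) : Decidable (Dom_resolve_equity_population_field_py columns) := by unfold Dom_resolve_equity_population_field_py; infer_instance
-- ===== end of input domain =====

-- B: one pass over the columns with a precomputed rank map and a running best pair,
-- instead of A's normalized dict followed by a probe over the candidates; same cost, no speed claim.
-- Both Pythons raise ValueError when no column normalizes to a supported field; Pre_ excludes exactly those inputs.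

-- ===== PORT A =====
def pvFields : List String := ["tot_pop", "totpop", "population", "total_population"]

-- str(column).strip().lower()
def pvNorm (s : String) : String := PySem.Str.lower (PySem.Str.strip s)

-- A's 'for candidate in _EQUITY_POPULATION_FIELDS: if candidate in normalized: return normalized[candidate]'
def pvProbeA (normalized : PySem.Dict String String) : List String → Option String
  | [] => none
  | cand :: rest =>
    match normalized.get? cand with
    | some v => some v
    | none => pvProbeA normalized rest

def resolve_equity_population_field_py (columns : List String) : String :=
  let normalized := columns.foldl (fun d c => d.insert (pvNorm c) c) PySem.Dict.empty
  match pvProbeA normalized pvFields with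
  | some v => v
  | none => ""   -- Python raises ValueError here; excluded by Pre_

-- ===== PORT B =====
-- rank = {field: i for i, field in enumerate(_EQUITY_POPULATION_FIELDS)}
def pvRank : PySem.Dict String Int :=
  (PySem.List.enumerate pvFields).foldl (fun d p => d.insert p.2 p.1) PySem.Dict.empty

-- loop body: r = rank.get(original.strip().lower()); skip if None; update best on r <= best_rank
def pvStepB (best : Option Int × Option String) (column : String) : Option Int × Option String :=
  match pvRank.get? (pvNorm column) with
  | none => best
  | some r =>
    match best.1 with
    | none => (some r, some column)
    | some br => if r ≤ br then (some r, some column) else best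

def resolve_equity_population_field_py_alt (columns : List String) : String :=
  let best := columns.foldl pvStepB (none, none)
  match best.2 with
  | some v => v
  | none => ""   -- Python raises ValueError here; excluded by Pre_

-- ===== PRECONDITION & SPEC =====
-- Pre_: some column's normalized form is a supported field name; otherwise Python A (and B) raise ValueError.
def Pre_resolve_equity_population_field_py (columns : List String) : Prop :=
  ∃ c ∈ columns, pvNorm c ∈ pvFields
instance (columns : List String) : Decidable (Pre_resolve_equity_population_field_py columns) := by unfold Pre_resolve_equity_population_field_py; infer_instance

def pvWitness_resolve_equity_population_field_py : List String := ["id", " Population "]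

def Spec_resolve_equity_population_field_py (columns : List String) (out : String) : Prop := out = resolve_equity_population_field_py_alt columns
instance (columns : List String) (out : String) : Decidable (Spec_resolve_equity_population_field_py columns out) := by unfold Spec_resolve_equity_population_field_py; infer_instance

-- ===== CLAIM (what is proved, stated in full; the proofs are below) =====
def Claim_equal_resolve_equity_population_field_py : Prop := ∀ (columns : List String), Dom_resolve_equity_population_field_py columns → Pre_resolve_equity_population_field_py columns → Spec_resolve_equity_population_field_py columns (resolve_equity_population_field_py columns)

-- ===== LEMMAS AND PROOFS =====

-- proof-side names for the two folds
def pvDictOf (cols : List String) : PySem.Dict String String :=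
  cols.foldl (fun d c => d.insert (pvNorm c) c) PySem.Dict.empty

def pvBestOf (cols : List String) : Option Int × Option String :=
  cols.foldl pvStepB (none, none)

-- the invariant tying B's running best to A's dict, plus (case 0) that nothing matched yet
def pvInv (cols : List String) : Prop :=
  (pvBestOf cols = (none, none) ∧ (∀ c ∈ cols, pvNorm c ∉ pvFields)
     ∧ (pvDictOf cols).get? "tot_pop" = none ∧ (pvDictOf cols).get? "totpop" = none
     ∧ (pvDictOf cols).get? "population" = none ∧ (pvDictOf cols).get? "total_population" = none)
  ∨ (∃ c, pvBestOf cols = (some 0, some c) ∧ (pvDictOf cols).get? "tot_pop" = some c)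
  ∨ (∃ c, pvBestOf cols = (some 1, some c) ∧ (pvDictOf cols).get? "tot_pop" = none
       ∧ (pvDictOf cols).get? "totpop" = some c)
  ∨ (∃ c, pvBestOf cols = (some 2, some c) ∧ (pvDictOf cols).get? "tot_pop" = none
       ∧ (pvDictOf cols).get? "totpop" = none ∧ (pvDictOf cols).get? "population" = some c)
  ∨ (∃ c, pvBestOf cols = (some 3, some c) ∧ (pvDictOf cols).get? "tot_pop" = none
       ∧ (pvDictOf cols).get? "totpop" = none ∧ (pvDictOf cols).get? "population" = none
       ∧ (pvDictOf cols).get? "total_population" = some c)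

lemma pvRank_get (k : String) :
    pvRank.get? k =
      if k = "tot_pop" then some (0 : Int) else if k = "totpop" then some 1
      else if k = "population" then some 2 else if k = "total_population" then some 3 else none := by
  have e : pvRank = PySem.Dict.mk
      [("tot_pop", (0 : Int)), ("totpop", 1), ("population", 2), ("total_population", 3)] := by rfl
  by_cases h0 : k = "tot_pop"
  · subst h0; simp [e, PySem.Dict.get?_mk_cons]
  · by_cases h1 : k = "totpop"
    · subst h1; simp [e, PySem.Dict.get?_mk_cons]
    · by_cases h2 : k = "population"
      · subst h2; simp [e, PySem.Dict.get?_mk_cons]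
      · by_cases h3 : k = "total_population"
        · subst h3; simp [e, PySem.Dict.get?_mk_cons]
        · simp [e, PySem.Dict.get?_mk_cons, PySem.Dict.get?, beq_iff_eq, h0, h1, h2, h3,
            Ne.symm h0, Ne.symm h1, Ne.symm h2, Ne.symm h3]

lemma pvDictOf_append (cols : List String) (x : String) (k : String) :
    (pvDictOf (cols ++ [x])).get? k =
      if pvNorm x = k then some x else (pvDictOf cols).get? k := by
  have hiff : (k = pvNorm x) = (pvNorm x = k) := propext ⟨Eq.symm, Eq.symm⟩
  simp [pvDictOf, List.foldl_append, PySem.Dict.get?_insert, hiff]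

lemma pvBestOf_append (cols : List String) (x : String) :
    pvBestOf (cols ++ [x]) = pvStepB (pvBestOf cols) x := by
  simp [pvBestOf, List.foldl_append]

lemma pvInv_holds (cols : List String) : pvInv cols := by
  induction cols using List.reverseRecOn with
  | nil =>
    left
    refine ⟨rfl, by simp, ?_, ?_, ?_, ?_⟩ <;> simp [pvDictOf, PySem.Dict.get?_empty]
  | append_singleton cols x ih =>
    have hb := pvBestOf_append cols x
    have hd := fun k => pvDictOf_append cols x k
    by_cases h0 : pvNorm x = "tot_pop"
    · -- rank 0: always becomes the new best
      right; left
      refine ⟨x, ?_, ?_⟩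
      · rw [hb]
        rcases ih with ⟨hB, -⟩ | ⟨c, hB, -⟩ | ⟨c, hB, -⟩ | ⟨c, hB, -, -⟩ | ⟨c, hB, -, -, -⟩ <;>
          simp [pvStepB, pvRank_get, h0, hB]
      · rw [hd]; simp [h0]
    · by_cases h1 : pvNorm x = "totpop"
      · rcases ih with ⟨hB, -, d0, -⟩ | ⟨c, hB, d0⟩ | ⟨c, hB, d0, -⟩ | ⟨c, hB, d0, -, -⟩ | ⟨c, hB, d0, -, -, -⟩
        · right; right; left
          exact ⟨x, by rw [hb]; simp [pvStepB, pvRank_get, h0, h1, hB],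
            by rw [hd]; simp [h0, h1, d0], by rw [hd]; simp [h1]⟩
        · -- existing best has rank 0, 1 ≤ 0 false: keep
          right; left
          exact ⟨c, by rw [hb]; simp [pvStepB, pvRank_get, h0, h1, hB],
            by rw [hd]; simp [h0, d0]⟩
        · right; right; left
          exact ⟨x, by rw [hb]; simp [pvStepB, pvRank_get, h0, h1, hB],
            by rw [hd]; simp [h0, d0], by rw [hd]; simp [h1]⟩
        · right; right; left
          exact ⟨x, by rw [hb]; simp [pvStepB, pvRank_get, h0, h1, hB],
            by rw [hd]; simp [h0, d0], by rw [hd]; simp [h1]⟩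
        · right; right; left
          exact ⟨x, by rw [hb]; simp [pvStepB, pvRank_get, h0, h1, hB],
            by rw [hd]; simp [h0, d0], by rw [hd]; simp [h1]⟩
      · by_cases h2 : pvNorm x = "population"
        · rcases ih with ⟨hB, -, d0, d1, -⟩ | ⟨c, hB, d0⟩ | ⟨c, hB, d0, d1⟩ | ⟨c, hB, d0, d1, -⟩ | ⟨c, hB, d0, d1, -, -⟩
          · right; right; right; left
            exact ⟨x, by rw [hb]; simp [pvStepB, pvRank_get, h0, h1, h2, hB],
              by rw [hd]; simp [h0, d0], by rw [hd]; simp [h1, d1], by rw [hd]; simp [h2]⟩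
          · right; left
            exact ⟨c, by rw [hb]; simp [pvStepB, pvRank_get, h0, h1, h2, hB],
              by rw [hd]; simp [h2, d0]⟩
          · right; right; left
            exact ⟨c, by rw [hb]; simp [pvStepB, pvRank_get, h0, h1, h2, hB],
              by rw [hd]; simp [h2, d0], by rw [hd]; simp [h2, d1]⟩
          · right; right; right; left
            exact ⟨x, by rw [hb]; simp [pvStepB, pvRank_get, h0, h1, h2, hB],
              by rw [hd]; simp [h0, d0], by rw [hd]; simp [h1, d1], by rw [hd]; simp [h2]⟩
          · right; right; right; left
            exact ⟨x, by rw [hb]; simp [pvStepB, pvRank_get, h0, h1, h2, hB],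
              by rw [hd]; simp [h0, d0], by rw [hd]; simp [h1, d1], by rw [hd]; simp [h2]⟩
        · by_cases h3 : pvNorm x = "total_population"
          · rcases ih with ⟨hB, -, d0, d1, d2, -⟩ | ⟨c, hB, d0⟩ | ⟨c, hB, d0, d1⟩ | ⟨c, hB, d0, d1, d2⟩ | ⟨c, hB, d0, d1, d2, -⟩
            · right; right; right; right
              exact ⟨x, by rw [hb]; simp [pvStepB, pvRank_get, h0, h1, h2, h3, hB],
                by rw [hd]; simp [h0, d0], by rw [hd]; simp [h1, d1],
                by rw [hd]; simp [h2, d2], by rw [hd]; simp [h3]⟩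
            · right; left
              exact ⟨c, by rw [hb]; simp [pvStepB, pvRank_get, h0, h1, h2, h3, hB],
                by rw [hd]; simp [h3, d0]⟩
            · right; right; left
              exact ⟨c, by rw [hb]; simp [pvStepB, pvRank_get, h0, h1, h2, h3, hB],
                by rw [hd]; simp [h3, d0], by rw [hd]; simp [h3, d1]⟩
            · right; right; right; left
              exact ⟨c, by rw [hb]; simp [pvStepB, pvRank_get, h0, h1, h2, h3, hB],
                by rw [hd]; simp [h3, d0], by rw [hd]; simp [h3, d1], by rw [hd]; simp [h3, d2]⟩
            · right; right; right; right
              exact ⟨x, by rw [hb]; simp [pvStepB, pvRank_get, h0, h1, h2, h3, hB],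
                by rw [hd]; simp [h0, d0], by rw [hd]; simp [h1, d1],
                by rw [hd]; simp [h2, d2], by rw [hd]; simp [h3]⟩
          · -- pvNorm x is not a field: nothing changes
            have hs : pvStepB (pvBestOf cols) x = pvBestOf cols := by
              simp [pvStepB, pvRank_get, h0, h1, h2, h3]
            have hnf : pvNorm x ∉ pvFields := by
              simp [pvFields, h0, h1, h2, h3]
            rcases ih with ⟨hB, hall, d0, d1, d2, d3⟩ | ⟨c, hB, d0⟩ | ⟨c, hB, d0, d1⟩ | ⟨c, hB, d0, d1, d2⟩ | ⟨c, hB, d0, d1, d2, d3⟩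
            · left
              refine ⟨by rw [hb, hs, hB], ?_, ?_, ?_, ?_, ?_⟩
              · intro c hc
                rcases List.mem_append.mp hc with h | h
                · exact hall c h
                · simp at h; subst h; exact hnf
              all_goals rw [hd]; simp_all [pvFields]
            · right; left
              exact ⟨c, by rw [hb, hs, hB], by rw [hd]; simp_all [pvFields]⟩
            · right; right; left
              exact ⟨c, by rw [hb, hs, hB], by rw [hd]; simp_all [pvFields],
                by rw [hd]; simp_all [pvFields]⟩
            · right; right; right; left
              exact ⟨c, by rw [hb, hs, hB], by rw [hd]; simp_all [pvFields],
                by rw [hd]; simp_all [pvFields], by rw [hd]; simp_all [pvFields]⟩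
            · right; right; right; right
              exact ⟨c, by rw [hb, hs, hB], by rw [hd]; simp_all [pvFields],
                by rw [hd]; simp_all [pvFields], by rw [hd]; simp_all [pvFields],
                by rw [hd]; simp_all [pvFields]⟩

-- ===== VERDICT (by name: the statement is the Claim_ definition above) =====
theorem resolve_equity_population_field_py_spec : Claim_equal_resolve_equity_population_field_py := by
  intro columns _ hpre
  unfold Spec_resolve_equity_population_field_py
  obtain ⟨c, hc, hcf⟩ := hpre
  have hA : resolve_equity_population_field_py columns =
      match pvProbeA (pvDictOf columns) pvFields with
      | some v => v | none => "" := rfl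
  have hB : resolve_equity_population_field_py_alt columns =
      match (pvBestOf columns).2 with
      | some v => v | none => "" := rfl
  rcases pvInv_holds columns with ⟨-, hall, -⟩ | ⟨v, hb, d0⟩ | ⟨v, hb, d0, d1⟩ |
      ⟨v, hb, d0, d1, d2⟩ | ⟨v, hb, d0, d1, d2, d3⟩
  · exact absurd hcf (hall c hc)
  all_goals rw [hA, hB, hb] <;> simp_all [pvProbeA, pvFields]
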